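-- pv_equiv track=rewrite | github.com/jmaccabee/advent-of-code-2019 | puzzles/day04/part2.py | has_unique_adjacent_integer
-- ===== SOURCE A (Python) =====
-- def has_unique_adjacent_integer(password, repeated_ints):
--     password = str(password)
--     for repeated_int in repeated_ints:
--         repeat = repeated_int * 2
--         count = 0
--         for i in range(len(password)-1):
--             if repeat == f"{password[i]}{password[i+1]}":
--                 count += 1
--         if count == 1:
--             return True
--     return False
-- ===== SOURCE B (Python) =====
-- def has_unique_adjacent_integer(password, repeated_ints):
--     s = str(password)
--     counts = {}
--     for a, b in zip(s, s[1:]):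
--         if a == b:
--             counts[a] = counts.get(a, 0) + 1
--     return any(counts.get(r, 0) == 1 for r in repeated_ints)
-- ===== Notes on version B (the rewrite author's own statement) =====
-- stated objective: faster
-- what changed: B makes one pass over str(password) building a dict of adjacent-equal-pair counts per digit character, then answers each candidate by a single dict lookup, instead of A's full rescan of the string for every candidate.
import Mathlib
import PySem

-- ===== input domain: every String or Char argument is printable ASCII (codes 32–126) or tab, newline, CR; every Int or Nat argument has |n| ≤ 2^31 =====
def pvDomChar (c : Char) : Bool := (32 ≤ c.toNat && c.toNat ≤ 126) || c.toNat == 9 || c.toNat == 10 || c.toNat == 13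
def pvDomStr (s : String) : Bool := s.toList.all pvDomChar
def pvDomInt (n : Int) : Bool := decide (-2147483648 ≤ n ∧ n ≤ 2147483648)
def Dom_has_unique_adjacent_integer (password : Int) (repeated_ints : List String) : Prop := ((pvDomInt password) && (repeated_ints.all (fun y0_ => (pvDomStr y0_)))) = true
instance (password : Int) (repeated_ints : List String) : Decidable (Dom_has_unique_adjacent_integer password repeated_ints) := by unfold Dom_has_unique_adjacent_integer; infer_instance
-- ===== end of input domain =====

-- B replaces A's per-candidate rescan of str(password) by one pass building a table of
-- adjacent-equal-pair counts per character, answered by a lookup per candidate, avoiding A's per-candidate rescans.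

-- ===== PORT A =====
-- inner loop: for i in range(len(password)-1): if repeat == password[i]+password[i+1]: count += 1
def aInner (s : List Char) (rep : List Char) : Nat :=
  (PySem.List.pyRange 0 ((s.length : Int) - 1) 1).foldl
    (fun count i =>
      if rep = [PySem.List.pyGetD s i ' ', PySem.List.pyGetD s (i + 1) ' '] then count + 1
      else count) 0

-- outer loop with early return
def aLoop (s : List Char) : List String → Bool
  | [] => false
  | r :: rest =>
      if aInner s (r.toList ++ r.toList) = 1 then true else aLoop s rest

def has_unique_adjacent_integer (password : Int) (repeated_ints : List String) : Bool :=
  aLoop (PySem.Int.toStr password).toList repeated_ints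

-- ===== PORT B =====
-- for a, b in zip(s, s[1:]): if a == b: counts[a] = counts.get(a, 0) + 1
def bCounts (s : List Char) : PySem.Dict String Nat :=
  (s.zip s.tail).foldl
    (fun d p =>
      if p.1 = p.2 then d.insert (String.ofList [p.1]) (d.getD (String.ofList [p.1]) 0 + 1) else d)
    PySem.Dict.empty

def has_unique_adjacent_integer_alt (password : Int) (repeated_ints : List String) : Bool :=
  let counts := bCounts (PySem.Int.toStr password).toList
  repeated_ints.any (fun r => counts.getD r 0 == 1)

-- ===== PRECONDITION & SPEC =====
def Spec_has_unique_adjacent_integer (password : Int) (repeated_ints : List String) (out : Bool) : Prop := out = has_unique_adjacent_integer_alt password repeated_ints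
instance (password : Int) (repeated_ints : List String) (out : Bool) : Decidable (Spec_has_unique_adjacent_integer password repeated_ints out) := by unfold Spec_has_unique_adjacent_integer; infer_instance

-- ===== CLAIM (what is proved, stated in full; the proofs are below) =====
def Claim_equal_has_unique_adjacent_integer : Prop := ∀ (password : Int) (repeated_ints : List String), Dom_has_unique_adjacent_integer password repeated_ints → Spec_has_unique_adjacent_integer password repeated_ints (has_unique_adjacent_integer password repeated_ints)

-- ===== LEMMAS AND PROOFS =====

-- counting foldl is countP
lemma foldl_count_decide {α : Type} (P : α → Prop) [DecidablePred P] (l : List α) (n : Nat) :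
    l.foldl (fun c x => if P x then c + 1 else c) n = n + l.countP (fun x => decide (P x)) := by
  induction l generalizing n with
  | nil => simp
  | cons a l ih =>
      by_cases h : P a <;> simp [h, ih] <;> omega


-- the index loop reads exactly the adjacent pairs
lemma map_pair_eq_zip (s : List Char) :
    (PySem.List.pyRange 0 ((s.length : Int) - 1) 1).map
        (fun i => (PySem.List.pyGetD s i ' ', PySem.List.pyGetD s (i + 1) ' '))
      = s.zip s.tail := by
  apply List.ext_getElem
  · simp [PySem.List.length_pyRange_one]
  · intro k h1 h2
    have hk : k < s.length - 1 := by
      simpa [PySem.List.length_pyRange_one] using h1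
    have hk1 : k < s.length := by omega
    have hk2 : k + 1 < s.length := by omega
    simp [PySem.List.getElem_pyRange_one, List.getElem_zip, List.getElem_tail]
    refine ⟨?_, ?_⟩
    · simp [List.getElem?_eq_getElem hk1]
    · have hc : ((k : Int) + 1) = ((k + 1 : Nat) : Int) := by push_cast; ring
      rw [hc, PySem.List.pyGetD_natCast]
      simp [List.getElem?_eq_getElem hk2]

lemma aInner_eq_countP (s : List Char) (rep : List Char) :
    aInner s rep = (s.zip s.tail).countP (fun p => decide (rep = [p.1, p.2])) := by
  have h1 : aInner s rep
      = ((PySem.List.pyRange 0 ((s.length : Int) - 1) 1).map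
          (fun i => (PySem.List.pyGetD s i ' ', PySem.List.pyGetD s (i + 1) ' '))).foldl
          (fun c (p : Char × Char) => if rep = [p.1, p.2] then c + 1 else c) 0 := by
    rw [List.foldl_map]
    rfl
  rw [h1, map_pair_eq_zip, foldl_count_decide (fun p : Char × Char => rep = [p.1, p.2])]
  simp

lemma bCounts_getD_aux (l : List (Char × Char)) (d : PySem.Dict String Nat) (r : String) :
    (l.foldl
      (fun d p =>
        if p.1 = p.2 then d.insert (String.ofList [p.1]) (d.getD (String.ofList [p.1]) 0 + 1) else d)
      d).getD r 0
    = d.getD r 0 + l.countP (fun p => p.1 == p.2 && String.ofList [p.1] == r) := by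
  induction l generalizing d with
  | nil => simp
  | cons a l ih =>
      simp only [List.foldl_cons, List.countP_cons]
      by_cases h : a.1 = a.2
      · rw [if_pos h, ih, PySem.Dict.getD_insert]
        by_cases hr : r = String.ofList [a.1]
        · simp [h, hr]
          omega
        · have h2 : (String.ofList [a.1] == r) = false := by
            simp only [beq_eq_false_iff_ne, ne_eq]
            exact fun e => hr e.symm
          simp [hr, h2]
      · rw [if_neg h, ih]
        have hb : (a.1 == a.2) = false := by simp [h]
        simp [hb]

lemma per_candidate (s : List Char) (r : String) :
    aInner s (r.toList ++ r.toList) = (bCounts s).getD r 0 := by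
  rw [aInner_eq_countP]
  unfold bCounts
  rw [bCounts_getD_aux]
  simp only [PySem.Dict.getD_empty, Nat.zero_add]
  apply List.countP_congr
  intro p _
  rcases hr : r.toList with _ | ⟨c, cs⟩
  · have hmk : (String.ofList [p.1] == r) = false := by
      simp only [beq_eq_false_iff_ne, ne_eq]
      intro e
      have := congrArg String.toList e
      simp [hr] at this
    simp [hmk]
  · rcases cs with _ | ⟨c2, cs2⟩
    · have hrr : r = String.ofList [c] := by
        have := congrArg String.ofList hr
        simpa using this
      subst hrr
      simp only [String.toList_ofList] at hr ⊢
      have hmk : (String.ofList [p.1] == String.ofList [c]) = (p.1 == c) := by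
        by_cases h : p.1 = c
        · simp [h]
        · have : ¬ (String.ofList [p.1] = String.ofList [c]) := by
            intro e
            have := congrArg String.toList e
            simp at this
            exact h this
          simp [h, this]
      rw [hmk]
      simp only [List.cons_append, List.nil_append]
      by_cases h1 : p.1 = c <;> by_cases h2 : p.2 = c
      · simp [h1, h2]
      · subst h1
        have hne : ¬ ([p.1, p.1] = [p.1, p.2]) := by
          intro e
          injection e with _ e2
          injection e2 with e3 _
          exact h2 e3.symm
        have hb2 : (p.1 == p.2) = false := by
          simp only [beq_eq_false_iff_ne, ne_eq]
          exact fun e => h2 e.symm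
        simp [hne, hb2]
      · have hne : ¬ ([c, c] = [p.1, p.2]) := by
          intro e
          injection e with e1 _
          exact h1 e1.symm
        simp [hne, h1]
      · have hne : ¬ ([c, c] = [p.1, p.2]) := by
          intro e
          injection e with e1 _
          exact h1 e1.symm
        simp [hne, h1]
    · have hlen : ¬ ((c :: c2 :: cs2) ++ (c :: c2 :: cs2) = [p.1, p.2]) := by
        intro e
        have := congrArg List.length e
        simp at this
      have hmk : (String.ofList [p.1] == r) = false := by
        simp only [beq_eq_false_iff_ne, ne_eq]
        intro e
        have := congrArg String.toList e
        rw [hr] at this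
        simp at this
      simp [hmk]

lemma loop_eq_any (s : List Char) (rs : List String) :
    aLoop s rs = rs.any (fun r => (bCounts s).getD r 0 == 1) := by
  induction rs with
  | nil => simp [aLoop]
  | cons r rs ih =>
      rw [aLoop, ih, List.any_cons, per_candidate]
      by_cases h : (bCounts s).getD r 0 = 1 <;> simp [h]

-- ===== VERDICT (by name: the statement is the Claim_ definition above) =====
theorem has_unique_adjacent_integer_spec : Claim_equal_has_unique_adjacent_integer := by
  intro password repeated_ints _
  unfold Spec_has_unique_adjacent_integer has_unique_adjacent_integer has_unique_adjacent_integer_alt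
  exact loop_eq_any _ _
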